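-- pv_equiv track=rewrite | github.com/venkatarao810/Climate-trend-analyzer | main.py | count_heatwave_events
-- ===== SOURCE A (Python) =====
-- def count_heatwave_events(days):
--     count, i = 0, 0
--     while i < len(days):
--         if days[i] == 1:
--             length = 0
--             while i < len(days) and days[i] == 1:
--                 length += 1
--                 i += 1
--             if length >= 3:
--                 count += 1
--         else:
--             i += 1
--     return count
-- ===== SOURCE B (Python) =====
-- def count_heatwave_events(days):
--     # Count run-START positions: an event begins at i iff days[i..i+2] are all 1
--     # and i is not preceded by a 1.
--     return sum(
--         1
--         for i in range(len(days) - 2)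
--         if days[i] == days[i + 1] == days[i + 2] == 1 and (i == 0 or days[i - 1] != 1)
--     )
-- ===== Notes on version B (the rewrite author's own statement) =====
-- stated objective: alternative
-- what changed: Instead of walking the list measuring the length of each run of 1s, B counts run-start positions with a sliding window over indices: i starts an event iff days[i..i+2] are all 1 and position i is not preceded by a 1; run lengths are never computed.
import Mathlib
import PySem

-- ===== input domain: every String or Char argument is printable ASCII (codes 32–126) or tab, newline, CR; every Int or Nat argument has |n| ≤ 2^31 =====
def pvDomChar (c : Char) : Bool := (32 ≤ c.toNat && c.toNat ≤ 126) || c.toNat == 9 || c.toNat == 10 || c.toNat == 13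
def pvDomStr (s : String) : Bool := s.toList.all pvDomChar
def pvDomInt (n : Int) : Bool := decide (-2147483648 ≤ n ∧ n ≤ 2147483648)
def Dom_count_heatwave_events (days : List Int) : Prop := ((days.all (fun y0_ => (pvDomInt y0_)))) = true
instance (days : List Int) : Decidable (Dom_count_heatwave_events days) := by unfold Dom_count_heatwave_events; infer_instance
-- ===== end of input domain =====

-- B counts run-start positions with an index window (days[i..i+2] all 1, no 1 before i)
-- instead of A's run-length-measuring while loops (alternative decomposition, same cost).


-- ===== PORT A =====
-- inner while loop: consume the run of 1s, returning (length so far, remaining suffix)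
def pvInnerA : List Int → Int → Int × List Int
  | [], length => (length, [])
  | d :: rest, length => if d = 1 then pvInnerA rest (length + 1) else (length, d :: rest)

theorem pvInnerA_len_le : ∀ (l : List Int) (len : Int), (pvInnerA l len).2.length ≤ l.length := by
  intro l
  induction l with
  | nil => intro len; simp [pvInnerA]
  | cons d rest ih =>
    intro len
    simp only [pvInnerA]
    split
    · exact Nat.le_trans (ih _) (Nat.le_succ _)
    · simp

-- outer while loop over the remaining suffix, with the running count
def pvOuterA : List Int → Int → Int
  | [], count => count
  | d :: rest, count =>
    if d = 1 then
      -- first inner iteration already saw days[i] = 1: length = 1, advance to rest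
      let p := pvInnerA rest 1
      pvOuterA p.2 (if 3 ≤ p.1 then count + 1 else count)
    else pvOuterA rest count
termination_by l _ => l.length
decreasing_by
  · exact Nat.lt_succ_of_le (pvInnerA_len_le rest 1)
  · simp

def count_heatwave_events (days : List Int) : Int := pvOuterA days 0

-- ===== PORT B =====
-- sum(1 for i in range(len(days)-2) if days[i]==days[i+1]==days[i+2]==1 and (i==0 or days[i-1]!=1))
-- every index accessed lies in [0, len(days)), so getD with a default is exact here
def count_heatwave_events_alt (days : List Int) : Int :=
  ((List.range (days.length - 2)).countP (fun i =>
    days.getD i 0 == 1 && days.getD (i + 1) 0 == 1 && days.getD (i + 2) 0 == 1 &&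
    (i == 0 || days.getD (i - 1) 0 != 1)) : Int)

-- ===== PRECONDITION & SPEC =====
def Spec_count_heatwave_events (days : List Int) (out : Int) : Prop := out = count_heatwave_events_alt days
instance (days : List Int) (out : Int) : Decidable (Spec_count_heatwave_events days out) := by unfold Spec_count_heatwave_events; infer_instance

-- ===== CLAIM (what is proved, stated in full; the proofs are below) =====
def Claim_equal_count_heatwave_events : Prop := ∀ (days : List Int), Dom_count_heatwave_events days → Spec_count_heatwave_events days (count_heatwave_events days)

-- ===== LEMMAS AND PROOFS =====

-- reference function: scan with the previous element, counting window matches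
def pvCnt : Int → List Int → Int
  | p, d1 :: d2 :: d3 :: rest =>
      (if p ≠ 1 ∧ d1 = 1 ∧ d2 = 1 ∧ d3 = 1 then 1 else 0) + pvCnt d1 (d2 :: d3 :: rest)
  | _, _ => 0

def pvHeadNot1 : List Int → Prop
  | [] => True
  | x :: _ => x ≠ 1

theorem pvCnt_headNot1 (p q : Int) : ∀ (r : List Int), pvHeadNot1 r → pvCnt p r = pvCnt q r := by
  intro r hr
  match r, hr with
  | [], _ => rfl
  | [a], _ => rfl
  | [a, b], _ => rfl
  | a :: b :: c :: t, ha =>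
    have ha' : a ≠ 1 := ha
    simp [pvCnt, ha']

theorem pvCnt_cons_ne1 (p d : Int) (hd : d ≠ 1) : ∀ (rest : List Int), pvCnt p (d :: rest) = pvCnt d rest := by
  intro rest
  match rest with
  | [] => rfl
  | [a] => rfl
  | a :: b :: t => simp [pvCnt, hd]

theorem pvCnt_one_cons (l : List Int) : pvCnt 1 (1 :: l) = pvCnt 1 l := by
  match l with
  | [] => rfl
  | [a] => rfl
  | a :: b :: t => simp [pvCnt]

theorem pvCnt_ones_prefix : ∀ (j : ℕ) (r : List Int), pvCnt 1 (List.replicate j 1 ++ r) = pvCnt 1 r := by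
  intro j
  induction j with
  | zero => intro r; simp
  | succ j ih =>
    intro r
    rw [List.replicate_succ, List.cons_append, pvCnt_one_cons, ih]

theorem pvCnt_run (p : Int) (hp : p ≠ 1) : ∀ (k : ℕ) (r : List Int), 1 ≤ k → pvHeadNot1 r →
    pvCnt p (List.replicate k 1 ++ r) = (if 3 ≤ (k : Int) then 1 else 0) + pvCnt 1 r := by
  intro k r hk hr
  match k, hk with
  | 1, _ =>
    rw [if_neg (by omega)]
    match r, hr with
    | [], _ => rfl
    | [a], _ => rfl
    | a :: b :: t, ha =>
      have ha' : a ≠ 1 := ha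
      simp [pvCnt, ha']
  | 2, _ =>
    rw [if_neg (by omega)]
    match r, hr with
    | [], _ => rfl
    | a :: t, ha =>
      show pvCnt p (1 :: 1 :: a :: t) = 0 + pvCnt 1 (a :: t)
      rw [pvCnt]
      rw [if_neg (by tauto), pvCnt_one_cons]
  | (m + 3), _ =>
    rw [if_pos (by push_cast; omega)]
    show pvCnt p (1 :: 1 :: 1 :: (List.replicate m 1 ++ r)) = 1 + pvCnt 1 r
    rw [pvCnt, if_pos (by tauto)]
    have : (1 : Int) :: 1 :: (List.replicate m 1 ++ r) = List.replicate (m + 2) 1 ++ r := by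
      simp [List.replicate_succ]
    rw [this, pvCnt_ones_prefix]

-- characterisation of the inner while loop: it strips the maximal prefix of 1s
theorem pvInnerA_spec : ∀ (l : List Int) (acc : Int),
    ∃ (m : ℕ) (r : List Int),
      pvInnerA l acc = (acc + (m : Int), r) ∧ l = List.replicate m 1 ++ r ∧ pvHeadNot1 r := by
  intro l
  induction l with
  | nil => intro acc; exact ⟨0, [], by simp [pvInnerA], by simp, trivial⟩
  | cons d rest ih =>
    intro acc
    by_cases hd : d = 1
    · obtain ⟨m, r, h1, h2, h3⟩ := ih (acc + 1)
      refine ⟨m + 1, r, ?_, ?_, h3⟩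
      · have hc : acc + 1 + (m : Int) = acc + ((m + 1 : ℕ) : Int) := by push_cast; ring
        simp [pvInnerA, hd, h1, hc]
      · simp [hd, List.replicate_succ, h2]
    · exact ⟨0, d :: rest, by simp [pvInnerA, hd], by simp, hd⟩

-- A's outer loop computes the reference count (for any non-1 previous element)
theorem pvOuterA_eq_aux : ∀ (n : ℕ) (l : List Int), l.length ≤ n → ∀ (count p : Int), p ≠ 1 →
    pvOuterA l count = count + pvCnt p l := by
  intro n
  induction n with
  | zero =>
    intro l hl count p hp
    have : l = [] := List.eq_nil_of_length_eq_zero (Nat.le_zero.mp hl)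
    subst this
    simp [pvOuterA, pvCnt]
  | succ n ih =>
    intro l hl count p hp
    match l with
    | [] => simp [pvOuterA, pvCnt]
    | d :: rest =>
      by_cases hd : d = 1
      · obtain ⟨m, r, h1, h2, h3⟩ := pvInnerA_spec rest 1
        have hlr : r.length ≤ n := by
          have := congrArg List.length h2
          simp at this hl
          omega
        have hrepl : d :: rest = List.replicate (m + 1) 1 ++ r := by
          simp [hd, List.replicate_succ, h2]
        have houter : pvOuterA (d :: rest) count
            = pvOuterA r (if 3 ≤ (1 : Int) + (m : Int) then count + 1 else count) := by
          simp only [pvOuterA, hd, if_pos, h1]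
        rw [houter, ih r hlr _ 0 (by decide), hrepl,
          pvCnt_run p hp (m + 1) r (by omega) h3,
          pvCnt_headNot1 1 0 r h3]
        have : ((m + 1 : ℕ) : Int) = 1 + (m : Int) := by push_cast; ring
        rw [this]
        split_ifs <;> ring
      · have hlr : rest.length ≤ n := by simp at hl; omega
        simp only [pvOuterA, hd, ite_false]
        rw [ih rest hlr count d hd, pvCnt_cons_ne1 p d hd rest]

-- index-based count with an explicit "previous element" for position 0
def pvCntIdx (p : Int) (l : List Int) : Int :=
  ((List.range (l.length - 2)).countP (fun i =>
    l.getD i 0 == 1 && l.getD (i + 1) 0 == 1 && l.getD (i + 2) 0 == 1 &&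
    ((if i = 0 then p else l.getD (i - 1) 0) != 1)) : Int)

theorem alt_eq_pvCntIdx (days : List Int) : count_heatwave_events_alt days = pvCntIdx 0 days := by
  unfold count_heatwave_events_alt pvCntIdx
  congr 1
  apply List.countP_congr
  intro i _
  cases i with
  | zero => simp
  | succ j => simp

theorem pvCntIdx_eq_pvCnt : ∀ (l : List Int) (p : Int), pvCntIdx p l = pvCnt p l := by
  intro l
  induction l with
  | nil => intro p; rfl
  | cons d rest ih =>
    intro p
    match rest with
    | [] => rfl
    | [a] => rfl
    | a :: b :: t =>
      have hlen : (d :: a :: b :: t).length - 2 = ((a :: b :: t).length - 2) + 1 := by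
        simp
      unfold pvCntIdx
      rw [hlen, List.range_succ_eq_map, List.countP_cons, List.countP_map]
      have hpred : ((fun i => (d :: a :: b :: t).getD i 0 == 1 &&
            (d :: a :: b :: t).getD (i + 1) 0 == 1 && (d :: a :: b :: t).getD (i + 2) 0 == 1 &&
            ((if i = 0 then p else (d :: a :: b :: t).getD (i - 1) 0) != 1)) ∘ Nat.succ)
          = (fun i => (a :: b :: t).getD i 0 == 1 &&
            (a :: b :: t).getD (i + 1) 0 == 1 && (a :: b :: t).getD (i + 2) 0 == 1 &&
            ((if i = 0 then d else (a :: b :: t).getD (i - 1) 0) != 1)) := by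
        funext j
        cases j with
        | zero => simp
        | succ i => simp
      rw [hpred]
      have hrest := ih d
      unfold pvCntIdx at hrest
      show ((List.countP _ _ + if _ then 1 else 0 : ℕ) : Int) = pvCnt p (d :: a :: b :: t)
      rw [pvCnt]
      push_cast
      rw [hrest]
      have hif : (if ((d :: a :: b :: t).getD 0 0 == 1 && (d :: a :: b :: t).getD 1 0 == 1 &&
              (d :: a :: b :: t).getD 2 0 == 1 && (p != 1)) = true
            then (1 : Int) else 0)
          = (if p ≠ 1 ∧ d = 1 ∧ a = 1 ∧ b = 1 then (1 : Int) else 0) := by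
        simp only [List.getD_cons_zero, List.getD_cons_succ]
        by_cases h1 : d = 1 <;> by_cases h2 : a = 1 <;> by_cases h3 : b = 1 <;>
          by_cases h4 : p = 1 <;> simp [h1, h2, h3, h4]
      rw [hif]
      ring

-- ===== VERDICT (by name: the statement is the Claim_ definition above) =====
theorem count_heatwave_events_spec : Claim_equal_count_heatwave_events := by
  intro days _
  unfold Spec_count_heatwave_events count_heatwave_events
  rw [alt_eq_pvCntIdx, pvCntIdx_eq_pvCnt,
    pvOuterA_eq_aux days.length days (Nat.le_refl _) 0 0 (by decide)]
  ring
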